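-- pv_equiv track=rewrite | github.com/TrapsterDK/URChess | findchessboard.py | longest_count
-- ===== SOURCE A (Python) =====
-- def count_from_index(list_of_numbers, index, reverse = False):
--     count = 1
--     index_number = list_of_numbers[index]
--     multiplier = -1 if reverse else 1
--     for next_number in list_of_numbers[index+1:] if not reverse else list_of_numbers[index-1::-1]:
--         if next_number != index_number + count * multiplier:
--             break
--         count += 1
--
--     return count
--
-- def longest_count(list_of_numbers):
--     # return the longest count of consecutive numbers starting from any number index and length
--     # if there are multiple longest counts, return the first one
--     longest_count = 0
--     longest_count_index = 0
--     for i in range(len(list_of_numbers)):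
--         count = count_from_index(list_of_numbers, i)
--         if count > longest_count:
--             longest_count = count
--             longest_count_index = i
--
--     return longest_count_index, longest_count
-- ===== SOURCE B (Python) =====
-- def longest_count(list_of_numbers):
--     # single pass: track the current ascending-by-1 run and keep the first longest
--     best_index = 0
--     best_len = 0
--     run_start = 0
--     run_len = 0
--     prev = 0
--     for i, x in enumerate(list_of_numbers):
--         if run_len > 0 and x == prev + 1:
--             run_len += 1
--         else:
--             run_start = i
--             run_len = 1
--         if run_len > best_len:
--             best_index = run_start
--             best_len = run_len
--         prev = x
--     return best_index, best_len
-- ===== Notes on version B (the rewrite author's own statement) =====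
-- stated objective: faster
-- what changed: Replaced the per-index rescan (count_from_index called for every start index) by a single left-to-right pass that tracks the current ascending-by-1 run and keeps the first longest run.
import Mathlib
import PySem

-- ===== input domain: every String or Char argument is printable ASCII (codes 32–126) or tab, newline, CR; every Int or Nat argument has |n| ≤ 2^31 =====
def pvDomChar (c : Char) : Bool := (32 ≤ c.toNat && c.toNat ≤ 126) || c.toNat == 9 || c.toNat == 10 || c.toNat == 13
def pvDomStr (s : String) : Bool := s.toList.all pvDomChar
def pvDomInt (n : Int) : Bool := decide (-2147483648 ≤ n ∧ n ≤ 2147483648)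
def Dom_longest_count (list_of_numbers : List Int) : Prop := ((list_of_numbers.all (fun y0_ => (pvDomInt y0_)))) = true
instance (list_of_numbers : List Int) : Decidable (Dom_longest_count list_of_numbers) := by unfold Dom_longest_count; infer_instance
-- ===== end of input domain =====

-- B replaces A's quadratic per-start-index rescan by a single pass that tracks the
-- current ascending-by-1 run and keeps the first longest run (objective: faster).

-- ===== PORT A =====
-- the 'for next_number in …: if …: break; count += 1' loop of count_from_index
def cfiLoop (index_number multiplier : Int) : List Int → Int → Int
  | [], count => count
  | next_number :: rest, count =>
    if next_number ≠ index_number + count * multiplier then count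
    else cfiLoop index_number multiplier rest (count + 1)

def count_from_index (list_of_numbers : List Int) (index : Int) (reverse : Bool) : Int :=
  match PySem.List.pyGet? list_of_numbers index with
  | none => 0
  | some index_number =>
    let multiplier : Int := if reverse then -1 else 1
    let seq : List Int :=
      if reverse then (PySem.List.slice? list_of_numbers (some (index - 1)) none (-1)).getD []
      else PySem.List.slice list_of_numbers (some (index + 1)) none
    cfiLoop index_number multiplier seq 1

def longest_count (list_of_numbers : List Int) : Int × Int :=
  let st :=
    (PySem.List.pyRange 0 (list_of_numbers.length : Int) 1).foldl
      (fun (acc : Int × Int) i =>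
        let count := count_from_index list_of_numbers i false
        if count > acc.1 then (count, i) else acc)
      (0, 0)
  (st.2, st.1)

-- ===== PORT B =====
-- one pass; state: (index i, prev element, run_start, run_len, best_index, best_len)
def altLoop : List Int → Int → Int → Int → Int → Int → Int → Int × Int
  | [], _, _, _, _, best_index, best_len => (best_index, best_len)
  | x :: rest, i, prev, run_start, run_len, best_index, best_len =>
    let rs := if run_len > 0 ∧ x = prev + 1 then run_start else i
    let rl := if run_len > 0 ∧ x = prev + 1 then run_len + 1 else 1
    let bi := if rl > best_len then rs else best_index
    let bl := if rl > best_len then rl else best_len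
    altLoop rest (i + 1) x rs rl bi bl

def longest_count_alt (list_of_numbers : List Int) : Int × Int :=
  altLoop list_of_numbers 0 0 0 0 0 0

-- ===== PRECONDITION & SPEC =====
def Spec_longest_count (list_of_numbers : List Int) (out : Int × Int) : Prop := out = longest_count_alt list_of_numbers
instance (list_of_numbers : List Int) (out : Int × Int) : Decidable (Spec_longest_count list_of_numbers out) := by unfold Spec_longest_count; infer_instance

-- ===== CLAIM (what is proved, stated in full; the proofs are below) =====
def Claim_equal_longest_count : Prop := ∀ (list_of_numbers : List Int), Dom_longest_count list_of_numbers → Spec_longest_count list_of_numbers (longest_count list_of_numbers)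

-- ===== LEMMAS AND PROOFS =====
-- matchLen l v = length of the maximal prefix of l equal to v, v+1, v+2, …;
-- G computes the first-longest-run answer run by run; both ports are reduced to G.
def matchLen : List Int → Int → Nat
  | [], _ => 0
  | y :: t, v => if y = v then matchLen t (v + 1) + 1 else 0

def G : List Int → Int × Int
  | [] => (0, 0)
  | x :: l =>
    let k := matchLen l (x + 1)
    let r := G (l.drop k)
    if r.2 > (1 + k : Int) then ((1 + k : Int) + r.1, r.2) else (0, (1 + k : Int))
termination_by xs => xs.length
decreasing_by simp

lemma G_cons (x : Int) (l : List Int) :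
    G (x :: l) =
      if (G (l.drop (matchLen l (x+1)))).2 > (1 + (matchLen l (x+1)) : Int)
      then ((1 + (matchLen l (x+1)) : Int) + (G (l.drop (matchLen l (x+1)))).1, (G (l.drop (matchLen l (x+1)))).2)
      else (0, (1 + (matchLen l (x+1)) : Int)) := by
  simp only [G]

lemma G_nonneg (xs : List Int) : 0 ≤ (G xs).2 := by
  cases xs with
  | nil => simp [G]
  | cons x l => rw [G_cons]; split <;> [omega; positivity]

lemma matchLen_max (l : List Int) (v : Int) (y : Int) (t : List Int)
    (h : l.drop (matchLen l v) = y :: t) : y ≠ v + matchLen l v := by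
  induction l generalizing v y t with
  | nil => simp [matchLen] at h
  | cons a l ih =>
    by_cases hav : a = v
    · rw [show matchLen (a :: l) v = matchLen l (v+1) + 1 by simp [matchLen, hav]] at h ⊢
      rw [List.drop_succ_cons] at h
      have := ih (v + 1) y t h
      push_cast at this ⊢
      omega
    · rw [show matchLen (a :: l) v = 0 by simp [matchLen, hav]] at h ⊢
      rw [List.drop_zero] at h
      cases h
      simpa using hav

lemma cfiLoop_spec (l : List Int) (v c : Int) :
    cfiLoop v 1 l c = c + matchLen l (v + c) := by
  induction l generalizing c with
  | nil => simp [cfiLoop, matchLen]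
  | cons y t ih =>
    by_cases hy : y = v + c
    · rw [show cfiLoop v 1 (y :: t) c = cfiLoop v 1 t (c+1) by simp [cfiLoop, hy]]
      rw [show matchLen (y :: t) (v + c) = matchLen t (v + c + 1) + 1 by simp [matchLen, hy]]
      rw [show v + c + 1 = v + (c + 1) by ring, ih (c + 1)]
      push_cast
      ring
    · rw [show cfiLoop v 1 (y :: t) c = c by simp [cfiLoop, hy]]
      rw [show matchLen (y :: t) (v + c) = 0 by simp [matchLen, hy]]
      simp

lemma cfi_spec (full : List Int) (j : Nat) (h : j < full.length) :
    count_from_index full (j : Int) false = 1 + (matchLen (full.drop (j + 1)) (full[j] + 1) : Int) := by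
  unfold count_from_index
  rw [PySem.List.pyGet?_natCast, List.getElem?_eq_getElem h]
  simp only [Bool.false_eq_true, if_false]
  rw [show (j : Int) + 1 = ((j + 1 : Nat) : Int) by push_cast; ring,
     PySem.List.slice_from_natCast, cfiLoop_spec]

def aRun : List Int → Int → Int → Int → Int × Int
  | [], _, lc, li => (lc, li)
  | x :: l, off, lc, li =>
    let c : Int := 1 + (matchLen l (x + 1) : Nat)
    if c > lc then aRun l (off + 1) c off else aRun l (off + 1) lc li

lemma aRun_cons (x : Int) (l : List Int) (off lc li : Int) :
    aRun (x :: l) off lc li =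
      if (1 + (matchLen l (x + 1) : Int)) > lc
      then aRun l (off + 1) (1 + (matchLen l (x + 1) : Int)) off
      else aRun l (off + 1) lc li := rfl

lemma aRun_congr (l : List Int) (o1 o2 a1 a2 b1 b2 : Int)
    (h1 : o1 = o2) (h2 : a1 = a2) (h3 : b1 = b2) :
    aRun l o1 a1 b1 = aRun l o2 a2 b2 := by rw [h1, h2, h3]

lemma aRun_run (k : Nat) :
    ∀ (l : List Int) (x : Int), matchLen l (x + 1) = k →
    ∀ (off lc li : Int),
      aRun (x :: l) off lc li =
        aRun (l.drop k) (off + 1 + k)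
          (if (1 + k : Int) > lc then (1 + k : Int) else lc)
          (if (1 + k : Int) > lc then off else li) := by
  induction k with
  | zero =>
    intro l x hk off lc li
    rw [aRun_cons, hk]
    simp only [Nat.cast_zero, add_zero, List.drop_zero]
    by_cases hc : (1 : Int) > lc
    · rw [if_pos hc, if_pos hc, if_pos hc]
    · rw [if_neg hc, if_neg hc, if_neg hc]
  | succ k ih =>
    intro l x hk off lc li
    cases l with
    | nil => simp [matchLen] at hk
    | cons y t =>
      have hy : y = x + 1 := by
        by_contra hne
        simp [matchLen, hne] at hk
      subst hy
      have ht : matchLen t ((x + 1) + 1) = k := by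
        rw [show matchLen ((x+1) :: t) (x + 1) = matchLen t (x + 1 + 1) + 1 by simp [matchLen]] at hk
        omega
      rw [aRun_cons, hk, List.drop_succ_cons]
      have hcast : ((k + 1 : Nat) : Int) = (k : Int) + 1 := by push_cast; ring
      by_cases hc : 1 + ((k + 1 : Nat) : Int) > lc
      · rw [if_pos hc, if_pos hc, if_pos hc, ih t (x + 1) ht (off + 1)]
        rw [if_neg (by rw [hcast] at hc ⊢; omega), if_neg (by rw [hcast] at hc ⊢; omega)]
        exact aRun_congr _ _ _ _ _ _ _ (by push_cast; ring) (by push_cast; ring) rfl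
      · rw [if_neg hc, if_neg hc, if_neg hc, ih t (x + 1) ht (off + 1)]
        by_cases hc2 : (1 + (k : Int)) > lc
        · exact absurd hc2 (by push_cast at hc; omega)
        · rw [if_neg hc2, if_neg hc2]
          exact aRun_congr _ _ _ _ _ _ _ (by push_cast; ring) rfl rfl

lemma aRun_gen (n : Nat) :
    ∀ (xs : List Int), xs.length ≤ n →
    ∀ (off lc li : Int), 0 ≤ lc →
      aRun xs off lc li =
        if (G xs).2 > lc then ((G xs).2, off + (G xs).1) else (lc, li) := by
  induction n with
  | zero =>
    intro xs hlen off lc li hlc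
    have hnil : xs = [] := by cases xs <;> simp_all
    subst hnil
    rw [show aRun [] off lc li = (lc, li) from rfl,
        show G [] = (0, 0) by simp [G], if_neg (by simp; omega)]
  | succ n ih =>
    intro xs hlen off lc li hlc
    cases xs with
    | nil =>
      rw [show aRun [] off lc li = (lc, li) from rfl,
          show G [] = (0, 0) by simp [G], if_neg (by simp; omega)]
    | cons x l =>
      set k := matchLen l (x + 1) with hk
      rw [aRun_run k l x hk.symm off lc li]
      have hrest : (l.drop k).length ≤ n := by
        simp only [List.length_drop]
        simp at hlen
        omega
      have hGr := G_nonneg (l.drop k)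
      set lc' : Int := if (1 + k : Int) > lc then (1 + k : Int) else lc with hlc'
      set li' : Int := if (1 + k : Int) > lc then off else li with hli'
      have hlc'0 : 0 ≤ lc' := by rw [hlc']; split <;> omega
      rw [ih (l.drop k) hrest (off + 1 + k) lc' li' hlc'0, G_cons, ← hk]
      set L := (G (l.drop k)).2 with hL
      set i0 := (G (l.drop k)).1 with hi0
      by_cases h1 : L > (1 + k : Int)
      · rw [if_pos h1]
        by_cases h2 : L > lc
        · rw [if_pos (show L > lc' by rw [hlc']; split <;> omega), if_pos h2]
          exact Prod.ext rfl (by ring)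
        · rw [if_neg (show ¬ L > lc' by rw [hlc']; omega), if_neg h2,
              hlc', hli', if_neg (by omega), if_neg (by omega)]
      · rw [if_neg h1]
        by_cases h2 : (1 + k : Int) > lc
        · rw [if_neg (show ¬ L > lc' by rw [hlc']; split <;> omega), if_pos h2,
              hlc', hli', if_pos h2, if_pos h2]
          exact Prod.ext rfl (by ring)
        · rw [if_neg (show ¬ L > lc' by rw [hlc']; split <;> omega), if_neg h2,
              hlc', hli', if_neg h2, if_neg h2]

lemma foldA (full : List Int) (m : Nat) :
    ∀ (j : Nat), j + m = full.length → ∀ (acc : Int × Int),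
      (List.range' j m).foldl
        (fun (acc : Int × Int) (kk : Nat) =>
          if count_from_index full ((kk : Nat) : Int) false > acc.1
          then (count_from_index full ((kk : Nat) : Int) false, ((kk : Nat) : Int))
          else acc)
        acc
      = aRun (full.drop j) (j : Int) acc.1 acc.2 := by
  induction m with
  | zero =>
    intro j hj acc
    rw [List.drop_eq_nil_of_le (by omega)]
    rfl
  | succ m ih =>
    intro j hj acc
    have hjlt : j < full.length := by omega
    rw [List.range'_succ, List.foldl_cons, ih (j + 1) (by omega),
        List.drop_eq_getElem_cons hjlt, aRun_cons, ← cfi_spec full j hjlt]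
    by_cases hc : count_from_index full ((j : Nat) : Int) false > acc.1
    · rw [if_pos hc, if_pos hc]
      exact aRun_congr _ _ _ _ _ _ _ (by push_cast; ring) rfl rfl
    · rw [if_neg hc, if_neg hc]
      exact aRun_congr _ _ _ _ _ _ _ (by push_cast; ring) rfl rfl

lemma longest_count_eq_G (xs : List Int) :
    longest_count xs = if (G xs).2 > 0 then ((G xs).1, (G xs).2) else (0, 0) := by
  unfold longest_count
  rw [PySem.List.pyRange_one]
  rw [show (((xs.length : Int) - 0).toNat) = xs.length by omega]
  rw [List.foldl_map, List.range_eq_range']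
  simp only [zero_add]
  rw [foldA xs xs.length 0 (by omega) (0, 0)]
  simp only [List.drop_zero, Nat.cast_zero]
  rw [aRun_gen xs.length xs le_rfl 0 0 0 le_rfl]
  split <;> simp

lemma altLoop_congr (l : List Int) (a1 a2 b1 b2 c1 c2 d1 d2 e1 e2 f1 f2 : Int)
    (h1 : a1 = a2) (h2 : b1 = b2) (h3 : c1 = c2) (h4 : d1 = d2) (h5 : e1 = e2) (h6 : f1 = f2) :
    altLoop l a1 b1 c1 d1 e1 f1 = altLoop l a2 b2 c2 d2 e2 f2 := by
  rw [h1, h2, h3, h4, h5, h6]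

lemma altLoop_cons_cont (x : Int) (rest : List Int) (i prev rs rl bi bl : Int)
    (h : rl > 0 ∧ x = prev + 1) :
    altLoop (x :: rest) i prev rs rl bi bl =
      altLoop rest (i + 1) x rs (rl + 1)
        (if rl + 1 > bl then rs else bi) (if rl + 1 > bl then rl + 1 else bl) := by
  simp only [altLoop, if_pos h]

lemma altLoop_cons_break (x : Int) (rest : List Int) (i prev rs rl bi bl : Int)
    (h : ¬ (rl > 0 ∧ x = prev + 1)) :
    altLoop (x :: rest) i prev rs rl bi bl =
      altLoop rest (i + 1) x i 1
        (if 1 > bl then i else bi) (if 1 > bl then 1 else bl) := by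
  simp only [altLoop, if_neg h]

lemma altLoop_run (k : Nat) :
    ∀ (l : List Int) (p : Int), matchLen l (p + 1) = k →
    ∀ (i rs rl bi bl : Int), 1 ≤ rl → rl ≤ bl →
      altLoop l i p rs rl bi bl =
        altLoop (l.drop k) (i + k) (p + k) rs (rl + k)
          (if rl + k > bl then rs else bi) (if rl + k > bl then rl + k else bl) := by
  induction k with
  | zero =>
    intro l p hk i rs rl bi bl h1 h2
    simp only [Nat.cast_zero, add_zero, List.drop_zero]
    rw [if_neg (by omega), if_neg (by omega)]
  | succ k ih =>
    intro l p hk i rs rl bi bl h1 h2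
    cases l with
    | nil => simp [matchLen] at hk
    | cons y t =>
      have hy : y = p + 1 := by
        by_contra hne
        simp [matchLen, hne] at hk
      subst hy
      have ht : matchLen t ((p + 1) + 1) = k := by
        rw [show matchLen ((p+1) :: t) (p + 1) = matchLen t (p + 1 + 1) + 1 by simp [matchLen]] at hk
        omega
      rw [altLoop_cons_cont (p+1) t i p rs rl bi bl ⟨by omega, rfl⟩]
      rw [ih t (p + 1) ht (i + 1) rs (rl + 1)
            (if rl + 1 > bl then rs else bi) (if rl + 1 > bl then rl + 1 else bl)
            (by omega) (by split_ifs <;> omega)]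
      rw [List.drop_succ_cons]
      refine altLoop_congr _ _ _ _ _ _ _ _ _ _ _ _ _ ?_ ?_ ?_ ?_ ?_ ?_ <;>
        push_cast <;> omega

lemma altLoop_gen (n : Nat) :
    ∀ (l : List Int), l.length ≤ n →
    ∀ (i p rs rl bi bl : Int), 0 ≤ bl →
      (rl ≤ 0 ∨ ∀ (y : Int) (t : List Int), l = y :: t → y ≠ p + 1) →
      altLoop l i p rs rl bi bl =
        if (G l).2 > bl then (i + (G l).1, (G l).2) else (bi, bl) := by
  induction n with
  | zero =>
    intro l hlen i p rs rl bi bl hbl _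
    have hnil : l = [] := by cases l <;> simp_all
    subst hnil
    rw [show altLoop [] i p rs rl bi bl = (bi, bl) from rfl,
        show G [] = (0, 0) by simp [G], if_neg (by simp; omega)]
  | succ n ih =>
    intro l hlen i p rs rl bi bl hbl hhead
    cases l with
    | nil =>
      rw [show altLoop [] i p rs rl bi bl = (bi, bl) from rfl,
          show G [] = (0, 0) by simp [G], if_neg (by simp; omega)]
    | cons x l' =>
      have hcond : ¬ (rl > 0 ∧ x = p + 1) := by
        rcases hhead with h | h
        · omega
        · exact fun ⟨_, hx⟩ => h x l' rfl hx
      rw [altLoop_cons_break x l' i p rs rl bi bl hcond]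
      set k := matchLen l' (x + 1) with hk
      rw [altLoop_run k l' x hk.symm (i + 1) i 1
            (if 1 > bl then i else bi) (if 1 > bl then 1 else bl)
            le_rfl (by split_ifs <;> omega)]
      have hrest : (l'.drop k).length ≤ n := by
        simp only [List.length_drop]
        simp at hlen
        omega
      have hnext : ((1 : Int) + k ≤ 0) ∨
          ∀ (y : Int) (t : List Int), l'.drop k = y :: t → y ≠ (x + (k : Int)) + 1 := by
        right
        intro y t hdt
        have hmax := matchLen_max l' (x + 1) y t (by rw [← hk]; exact hdt)
        rw [← hk] at hmax
        intro hcontra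
        apply hmax
        omega
      rw [ih (l'.drop k) hrest (i + 1 + k) (x + k) i (1 + k)
            (if 1 + (k : Int) > (if 1 > bl then 1 else bl) then i else (if 1 > bl then i else bi))
            (if 1 + (k : Int) > (if 1 > bl then 1 else bl) then 1 + (k : Int) else (if 1 > bl then 1 else bl))
            (by split_ifs <;> omega) hnext]
      rw [G_cons, ← hk]
      have hGr := G_nonneg (l'.drop k)
      rw [Prod.ext_iff]
      constructor <;> simp only [apply_ite (Prod.fst), apply_ite (Prod.snd)] <;> push_cast <;> omega

lemma longest_count_alt_eq_G (xs : List Int) :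
    longest_count_alt xs = if (G xs).2 > 0 then ((G xs).1, (G xs).2) else (0, 0) := by
  unfold longest_count_alt
  rw [altLoop_gen xs.length xs le_rfl 0 0 0 0 0 0 le_rfl (Or.inl le_rfl)]
  split <;> simp

-- ===== VERDICT (by name: the statement is the Claim_ definition above) =====
theorem longest_count_spec : Claim_equal_longest_count := by
  intro xs _
  unfold Spec_longest_count
  rw [longest_count_eq_G, longest_count_alt_eq_G]
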